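-- pv_equiv track=rewrite | github.com/Flight3R/i-konewka | backend/src/helpers.py | is_weekday_active
-- ===== SOURCE A (Python) =====
-- def is_weekday_active(nof_watering_days):
--     weakdays = ['monday', 'tuesday', 'wednesday', 'thursday', 'friday', 'saturday', 'sunday']
--     watering_schedule = {}
--     for day in weakdays:
--         watering_schedule[day] = 0
--     if nof_watering_days == '1':
--         watering_schedule['monday'] = 1
--     elif nof_watering_days == '2':
--         watering_schedule['monday'] = 1
--         watering_schedule['thursday'] = 1
--     elif nof_watering_days == '3':
--         watering_schedule['monday'] = 1
--         watering_schedule['wednesday'] = 1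
--         watering_schedule['saturday'] = 1
--     elif nof_watering_days == '7':
--         for day in weakdays:
--             watering_schedule[day] = 1
--     else:
--         watering_schedule['monday'] = 1
--         watering_schedule['wednesday'] = 1
--         watering_schedule['friday'] = 1
--         watering_schedule['saturday'] = 1
--     return watering_schedule
-- ===== SOURCE B (Python) =====
-- WEEKDAYS = ['monday', 'tuesday', 'wednesday', 'thursday', 'friday', 'saturday', 'sunday']
--
-- ACTIVE_TABLE = {
--     '1': ['monday'],
--     '2': ['monday', 'thursday'],
--     '3': ['monday', 'wednesday', 'saturday'],
--     '7': WEEKDAYS,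
-- }
--
-- DEFAULT_ACTIVE = ['monday', 'wednesday', 'friday', 'saturday']
--
--
-- def is_weekday_active(nof_watering_days):
--     active = ACTIVE_TABLE.get(nof_watering_days, DEFAULT_ACTIVE)
--     return {day: (1 if day in active else 0) for day in WEEKDAYS}
-- ===== Notes on version B (the rewrite author's own statement) =====
-- stated objective: simpler
-- what changed: Replaced the zero-init-then-overwrite if/elif cascade by a declarative table mapping each recognized input to its active-day list plus one dict comprehension marking each weekday 1 or 0 by membership.
import Mathlib
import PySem

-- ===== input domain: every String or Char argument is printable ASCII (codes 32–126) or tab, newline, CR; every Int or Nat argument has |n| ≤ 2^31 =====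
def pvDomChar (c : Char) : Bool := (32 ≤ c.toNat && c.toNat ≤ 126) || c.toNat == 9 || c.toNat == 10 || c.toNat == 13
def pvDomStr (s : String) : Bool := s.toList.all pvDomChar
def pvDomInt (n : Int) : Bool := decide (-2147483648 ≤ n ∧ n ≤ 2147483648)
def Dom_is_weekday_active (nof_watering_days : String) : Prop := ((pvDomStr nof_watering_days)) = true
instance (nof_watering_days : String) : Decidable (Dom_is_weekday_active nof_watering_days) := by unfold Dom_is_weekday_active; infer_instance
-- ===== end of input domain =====

-- B replaces A's zero-init-then-overwrite if/elif cascade by a lookup table of active-day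
-- lists plus one membership comprehension (objective: simpler); same values on all inputs.

-- ===== PORT A =====
def is_weekday_active (nof_watering_days : String) : List (String × Int) :=
  let weakdays : List String :=
    ["monday", "tuesday", "wednesday", "thursday", "friday", "saturday", "sunday"]
  let watering_schedule : PySem.Dict String Int :=
    weakdays.foldl (fun d day => d.insert day 0) PySem.Dict.empty
  let watering_schedule :=
    if nof_watering_days = "1" then
      watering_schedule.insert "monday" 1
    else if nof_watering_days = "2" then
      (watering_schedule.insert "monday" 1).insert "thursday" 1
    else if nof_watering_days = "3" then
      ((watering_schedule.insert "monday" 1).insert "wednesday" 1).insert "saturday" 1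
    else if nof_watering_days = "7" then
      weakdays.foldl (fun d day => d.insert day 1) watering_schedule
    else
      (((watering_schedule.insert "monday" 1).insert "wednesday" 1).insert
        "friday" 1).insert "saturday" 1
  watering_schedule.items

-- ===== PORT B =====
def pvWeekdaysB : List String :=
  ["monday", "tuesday", "wednesday", "thursday", "friday", "saturday", "sunday"]

def pvActiveTableB : PySem.Dict String (List String) :=
  PySem.Dict.mk
    [("1", ["monday"]),
     ("2", ["monday", "thursday"]),
     ("3", ["monday", "wednesday", "saturday"]),
     ("7", pvWeekdaysB)]

def pvDefaultActiveB : List String := ["monday", "wednesday", "friday", "saturday"]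

def is_weekday_active_alt (nof_watering_days : String) : List (String × Int) :=
  let active := pvActiveTableB.getD nof_watering_days pvDefaultActiveB
  pvWeekdaysB.map (fun day => (day, if active.contains day then (1 : Int) else 0))

-- ===== PRECONDITION & SPEC =====
def Spec_is_weekday_active (nof_watering_days : String) (out : List (String × Int)) : Prop := out = is_weekday_active_alt nof_watering_days
instance (nof_watering_days : String) (out : List (String × Int)) : Decidable (Spec_is_weekday_active nof_watering_days out) := by unfold Spec_is_weekday_active; infer_instance

-- ===== CLAIM (what is proved, stated in full; the proofs are below) =====
def Claim_equal_is_weekday_active : Prop := ∀ (nof_watering_days : String), Dom_is_weekday_active nof_watering_days → Spec_is_weekday_active nof_watering_days (is_weekday_active nof_watering_days)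

-- ===== LEMMAS AND PROOFS =====

-- ===== VERDICT (by name: the statement is the Claim_ definition above) =====
theorem is_weekday_active_spec : Claim_equal_is_weekday_active := by
  intro s _
  unfold Spec_is_weekday_active
  by_cases h1 : s = "1"
  · subst h1; decide
  by_cases h2 : s = "2"
  · subst h2; decide
  by_cases h3 : s = "3"
  · subst h3; decide
  by_cases h7 : s = "7"
  · subst h7; decide
  have h1' : ¬("1" = s) := fun h => h1 h.symm
  have h2' : ¬("2" = s) := fun h => h2 h.symm
  have h3' : ¬("3" = s) := fun h => h3 h.symm
  have h7' : ¬("7" = s) := fun h => h7 h.symm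
  simp [is_weekday_active, is_weekday_active_alt, pvActiveTableB, PySem.Dict.getD,
    PySem.Dict.get?, h1, h2, h3, h7, h1', h2', h3', h7']
  decide
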